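-- pv_equiv track=rewrite | github.com/themusharraf/aioBotTemplate | handlers/users/scarper.py | detect_alphabet
-- ===== SOURCE A (Python) =====
-- def detect_alphabet(text):
--     latin_alphabet = set("qertyuiopasdfghjklzxcvbnmo'g'chsho‘g‘")
--     cyrillic_alphabet = set("қертюиопасдфгҳжклзcвбнмўғчшнг")
--
--     text_lower = text.lower()
--
--     contains_latin = any(char in latin_alphabet for char in text_lower)
--     contains_cyrillic = any(char in cyrillic_alphabet for char in text_lower)
--
--     if contains_latin and contains_cyrillic:
--         return "Lotin va Krill"
--     elif contains_latin:
--         return "Lotin"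
--     elif contains_cyrillic:
--         return "Krill"
--     else:
--         return "Mix"
-- ===== SOURCE B (Python) =====
-- def detect_alphabet(text):
--     latin_alphabet = "qertyuiopasdfghjklzxcvbnmo'g'chsho‘g‘"
--     cyrillic_alphabet = "қертюиопасдфгҳжклзcвбнмўғчшнг"
--
--     state = 0
--     for ch in text.lower():
--         if ch in latin_alphabet:
--             state |= 1
--         if ch in cyrillic_alphabet:
--             state |= 2
--         if state == 3:
--             break
--     return ("Mix", "Lotin", "Krill", "Lotin va Krill")[state]
-- ===== Notes on version B (the rewrite author's own statement) =====
-- stated objective: alternative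
-- what changed: B replaces A's two staged any() scans and the if/elif chain with a single fused pass over the lowered text that accumulates a 2-bit state mask (1=latin seen, 2=cyrillic seen), breaks early once both are seen, and returns the answer by indexing a 4-entry result table with the mask.
import Mathlib
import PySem

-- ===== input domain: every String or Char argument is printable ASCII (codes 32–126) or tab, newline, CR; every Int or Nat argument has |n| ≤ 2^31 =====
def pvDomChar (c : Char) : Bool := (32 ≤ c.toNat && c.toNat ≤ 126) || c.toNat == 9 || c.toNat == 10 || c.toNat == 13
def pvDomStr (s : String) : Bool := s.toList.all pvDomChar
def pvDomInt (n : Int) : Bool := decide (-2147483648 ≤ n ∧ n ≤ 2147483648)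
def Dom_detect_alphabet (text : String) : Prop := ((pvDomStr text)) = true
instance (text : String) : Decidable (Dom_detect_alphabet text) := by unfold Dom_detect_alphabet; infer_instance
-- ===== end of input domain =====

-- B replaces A's two staged any() scans and if/elif chain with one fused pass keeping a 2-bit
-- state mask with early exit, then a table lookup by the mask (alternative decomposition, same cost).


-- ===== PORT A =====
def detect_alphabet (text : String) : String :=
  let latin_alphabet : PySem.Set Char := PySem.Set.ofList "qertyuiopasdfghjklzxcvbnmo'g'chsho‘g‘".toList
  let cyrillic_alphabet : PySem.Set Char := PySem.Set.ofList "қертюиопасдфгҳжклзcвбнмўғчшнг".toList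
  let text_lower := (PySem.Str.lower text).toList
  let contains_latin := text_lower.any (fun c => PySem.Set.contains latin_alphabet c)
  let contains_cyrillic := text_lower.any (fun c => PySem.Set.contains cyrillic_alphabet c)
  if contains_latin && contains_cyrillic then "Lotin va Krill"
  else if contains_latin then "Lotin"
  else if contains_cyrillic then "Krill"
  else "Mix"

-- ===== PORT B =====
-- 'ch in s' on a 1-char ch and an alphabet string is char membership: List.contains on toList is exact here.
def detect_alphabet_loop (latin cyr : List Char) : List Char → Nat → Nat
  | [], state => state
  | ch :: rest, state =>
    let state := if latin.contains ch then state ||| 1 else state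
    let state := if cyr.contains ch then state ||| 2 else state
    if state == 3 then state else detect_alphabet_loop latin cyr rest state

def detect_alphabet_alt (text : String) : String :=
  let latin_alphabet := "qertyuiopasdfghjklzxcvbnmo'g'chsho‘g‘".toList
  let cyrillic_alphabet := "қертюиопасдфгҳжклзcвбнмўғчшнг".toList
  let state := detect_alphabet_loop latin_alphabet cyrillic_alphabet (PySem.Str.lower text).toList 0
  (["Mix", "Lotin", "Krill", "Lotin va Krill"]).getD state ""

-- ===== PRECONDITION & SPEC =====
def Spec_detect_alphabet (text : String) (out : String) : Prop := out = detect_alphabet_alt text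
instance (text : String) (out : String) : Decidable (Spec_detect_alphabet text out) := by unfold Spec_detect_alphabet; infer_instance

-- ===== CLAIM =====
def Claim_equal_detect_alphabet : Prop := ∀ (text : String), Dom_detect_alphabet text → Spec_detect_alphabet text (detect_alphabet text)

-- ===== LEMMAS AND PROOFS =====

-- The fused early-exit loop computes exactly the OR of the start state with the two "any" bits.
set_option maxHeartbeats 1000000 in
set_option maxRecDepth 8000 in
theorem detect_alphabet_loop_eq (latin cyr : List Char) (tl : List Char) (st : Nat) (hst : st < 4) :
    detect_alphabet_loop latin cyr tl st =
      st ||| (if tl.any (fun c => latin.contains c) then 1 else 0)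
         ||| (if tl.any (fun c => cyr.contains c) then 2 else 0) := by
  induction tl generalizing st with
  | nil => simp [detect_alphabet_loop]
  | cons ch rest ih =>
    rcases Bool.eq_false_or_eq_true (latin.contains ch) with ha | ha <;>
    rcases Bool.eq_false_or_eq_true (cyr.contains ch) with hb | hb <;>
    rcases Bool.eq_false_or_eq_true (rest.any (fun c => latin.contains c)) with hc | hc <;>
    rcases Bool.eq_false_or_eq_true (rest.any (fun c => cyr.contains c)) with hd | hd <;>
    simp only [detect_alphabet_loop, List.any_cons, ha, hb, hc, hd,
      Bool.true_or, Bool.false_or, if_true] <;>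
    interval_cases st <;>
    simp_all [ih] <;> aesop

-- A's Set membership over the ofList alphabet is List.contains over the alphabet list.
theorem set_contains_eq_list_contains (l : List Char) (c : Char) :
    PySem.Set.contains (PySem.Set.ofList l) c = l.contains c := by
  rw [Bool.eq_iff_iff, List.contains_iff_mem]
  simp only [PySem.Set.contains, List.contains_iff_mem, PySem.Set.mem_ofList]

-- ===== VERDICT =====
theorem detect_alphabet_spec : Claim_equal_detect_alphabet := by
  intro text _
  unfold Spec_detect_alphabet detect_alphabet detect_alphabet_alt
  simp only [set_contains_eq_list_contains]
  rw [detect_alphabet_loop_eq _ _ _ 0 (by norm_num)]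
  rcases Bool.eq_false_or_eq_true ((PySem.Str.lower text).toList.any
      (fun c => "qertyuiopasdfghjklzxcvbnmo'g'chsho‘g‘".toList.contains c)) with ha | ha <;>
  rcases Bool.eq_false_or_eq_true ((PySem.Str.lower text).toList.any
      (fun c => "қертюиопасдфгҳжклзcвбнмўғчшнг".toList.contains c)) with hb | hb <;>
  simp only [ha, hb] <;> rfl
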